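-- pv_equiv track=rewrite | github.com/spockoo/phi-complexity | phi_complexity/backends/c_rust_light.py | _extraire_arguments
-- ===== SOURCE A (Python) =====
-- from typing import List, Optional, Tuple
--
-- def _extraire_arguments(args_bruts: str) -> List[str]:
--     """Découpe une chaîne d'arguments C en respectant les parenthèses et guillemets."""
--     args: List[str] = []
--     courant: List[str] = []
--     profondeur = 0
--     dans_chaine = False
--     escape = False
--
--     for car in args_bruts:
--         if escape:
--             courant.append(car)
--             escape = False
--             continue
--         if car == "\\":
--             courant.append(car)
--             escape = True
--             continue
--         if car == '"' and profondeur == 0: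
--             dans_chaine = not dans_chaine
--             courant.append(car)
--             continue
--         if dans_chaine:
--             courant.append(car)
--             continue
--         if car == "(":
--             profondeur += 1
--             courant.append(car)
--         elif car == ")":
--             profondeur -= 1
--             courant.append(car)
--         elif car == "," and profondeur == 0:
--             args.append("".join(courant).strip())
--             courant = []
--         else:
--             courant.append(car)
--
--     reste = "".join(courant).strip()
--     if reste:
--         args.append(reste)
--     return args
-- ===== SOURCE B (Python) =====
-- from typing import List
--
-- def _extraire_arguments(args_bruts: str) -> List[str]:
--     """Single scan that records only the indices of top-level commas, then
--     builds the arguments by slicing the original string between boundaries."""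
--     cuts: List[int] = []
--     depth = 0
--     in_str = False
--     esc = False
--     for i, car in enumerate(args_bruts):
--         if esc:
--             esc = False
--         elif car == "\\":
--             esc = True
--         elif car == '"' and depth == 0:
--             in_str = not in_str
--         elif in_str:
--             pass
--         elif car == "(":
--             depth += 1
--         elif car == ")":
--             depth -= 1
--         elif car == "," and depth == 0:
--             cuts.append(i)
--     bounds = [0] + [c + 1 for c in cuts] + [len(args_bruts) + 1]
--     segs = [args_bruts[a:b - 1].strip() for a, b in zip(bounds, bounds[1:])]
--     if segs and not segs[-1]:
--         segs.pop()
--     return segs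
-- ===== Notes on version B (the rewrite author's own statement) =====
-- stated objective: alternative
-- what changed: B's scan records only the integer indices of top-level commas (no per-character accumulation), and the arguments are then produced by slicing the original string between consecutive boundary indices and stripping each slice, dropping a trailing empty segment.
import Mathlib
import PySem

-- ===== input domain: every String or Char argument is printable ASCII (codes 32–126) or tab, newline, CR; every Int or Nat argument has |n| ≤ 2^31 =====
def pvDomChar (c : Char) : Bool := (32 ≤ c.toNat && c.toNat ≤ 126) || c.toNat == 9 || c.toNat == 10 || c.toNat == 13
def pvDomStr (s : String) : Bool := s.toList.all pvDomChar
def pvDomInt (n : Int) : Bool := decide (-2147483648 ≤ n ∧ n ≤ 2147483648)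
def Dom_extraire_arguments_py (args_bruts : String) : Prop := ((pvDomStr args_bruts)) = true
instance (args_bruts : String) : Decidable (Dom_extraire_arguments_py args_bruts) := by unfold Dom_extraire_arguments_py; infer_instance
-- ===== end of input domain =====

-- B records only the integer indices of top-level commas in the single scan and then slices the
-- original string between consecutive boundaries, instead of accumulating the characters of the
-- current argument (objective: alternative decomposition, same cost).

-- ===== PORT A =====
-- state = (args, courant, profondeur, dans_chaine, escape); courant kept as List Char,
-- "".join(...).strip() becomes PySem.Chars.strip, String built at the end.
def pvStepA (st : List (List Char) × List Char × Int × Bool × Bool) (car : Char) :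
    List (List Char) × List Char × Int × Bool × Bool :=
  match st with
  | (args, courant, profondeur, dans_chaine, escape) =>
    if escape then (args, courant ++ [car], profondeur, dans_chaine, false)
    else if car = '\\' then (args, courant ++ [car], profondeur, dans_chaine, true)
    else if car = '"' ∧ profondeur = 0 then (args, courant ++ [car], profondeur, !dans_chaine, escape)
    else if dans_chaine then (args, courant ++ [car], profondeur, dans_chaine, escape)
    else if car = '(' then (args, courant ++ [car], profondeur + 1, dans_chaine, escape)
    else if car = ')' then (args, courant ++ [car], profondeur - 1, dans_chaine, escape)
    else if car = ',' ∧ profondeur = 0 then (args ++ [PySem.Chars.strip courant], [], profondeur, dans_chaine, escape)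
    else (args, courant ++ [car], profondeur, dans_chaine, escape)

def extraire_arguments_py (args_bruts : String) : List String :=
  match args_bruts.toList.foldl pvStepA ([], [], 0, false, false) with
  | (args, courant, _, _, _) =>
    let reste := PySem.Chars.strip courant
    (if reste ≠ [] then args ++ [reste] else args).map String.ofList

-- ===== PORT B =====
-- state = (cuts, depth, in_str, esc); only comma indices are recorded.
def pvStepB (st : List Int × Int × Bool × Bool) (ic : Int × Char) :
    List Int × Int × Bool × Bool :=
  match st, ic with
  | (cuts, depth, in_str, esc), (i, car) =>
    if esc then (cuts, depth, in_str, false)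
    else if car = '\\' then (cuts, depth, in_str, true)
    else if car = '"' ∧ depth = 0 then (cuts, depth, !in_str, esc)
    else if in_str then (cuts, depth, in_str, esc)
    else if car = '(' then (cuts, depth + 1, in_str, esc)
    else if car = ')' then (cuts, depth - 1, in_str, esc)
    else if car = ',' ∧ depth = 0 then (cuts ++ [i], depth, in_str, esc)
    else (cuts, depth, in_str, esc)

def extraire_arguments_py_alt (args_bruts : String) : List String :=
  let cs := args_bruts.toList
  let cuts := ((PySem.List.enumerate cs).foldl pvStepB ([], 0, false, false)).1
  let bounds : List Int := 0 :: (cuts.map (· + 1) ++ [PySem.List.len cs + 1])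
  let segs := (bounds.zip bounds.tail).map
    (fun ab => PySem.Chars.strip (PySem.List.slice cs (some ab.1) (some (ab.2 - 1))))
  let segs2 := if segs ≠ [] ∧ PySem.List.pyGetD segs (-1) [] = [] then segs.dropLast else segs
  segs2.map String.ofList

-- ===== PRECONDITION & SPEC =====
def Spec_extraire_arguments_py (args_bruts : String) (out : List String) : Prop := out = extraire_arguments_py_alt args_bruts
instance (args_bruts : String) (out : List String) : Decidable (Spec_extraire_arguments_py args_bruts out) := by unfold Spec_extraire_arguments_py; infer_instance

-- ===== CLAIM (what is proved, stated in full; the proofs are below) =====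
def Claim_equal_extraire_arguments_py : Prop := ∀ (args_bruts : String), Dom_extraire_arguments_py args_bruts → Spec_extraire_arguments_py args_bruts (extraire_arguments_py args_bruts)

-- ===== LEMMAS AND PROOFS =====

-- segments of cs determined by a start index and the list of cut indices
def pvSegs (cs : List Char) (s : Int) : List Int → List (List Char)
  | [] => []
  | c :: rest => PySem.Chars.strip (PySem.List.slice cs (some s) (some c)) :: pvSegs cs (c + 1) rest

-- start index of the still-open segment after the given cuts
def pvLast (s : Int) : List Int → Int
  | [] => s
  | c :: rest => pvLast (c + 1) rest

lemma pvSlice_prefix (p t : List Char) (s : Int) (hs0 : 0 ≤ s) (hsp : s ≤ (p.length : Int)) :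
    PySem.List.slice (p ++ t) (some s) (some (p.length : Int)) = p.drop s.toNat := by
  rw [PySem.List.slice_toNat _ hs0 (by positivity)]
  rw [Int.toNat_natCast]
  rw [List.drop_append_of_le_length (by omega)]
  rw [List.take_append_of_le_length (by simp)]
  exact List.take_of_length_le (by simp)

lemma pvLoop : ∀ (t p : List Char) (args : List (List Char)) (cuts : List Int)
    (prof : Int) (dans esc : Bool) (s : Int)
    (hs0 : 0 ≤ s) (hsp : s ≤ (p.length : Int)),
    ∃ (nc : List Int) (prof' : Int) (dans' esc' : Bool),
      t.foldl pvStepA (args, p.drop s.toNat, prof, dans, esc)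
        = (args ++ pvSegs (p ++ t) s nc, (p ++ t).drop (pvLast s nc).toNat, prof', dans', esc')
      ∧ (PySem.List.enumerate t (p.length : Int)).foldl pvStepB (cuts, prof, dans, esc)
        = (cuts ++ nc, prof', dans', esc')
      ∧ 0 ≤ pvLast s nc ∧ pvLast s nc ≤ ((p ++ t).length : Int) := by
  intro t
  induction t with
  | nil =>
    intro p args cuts prof dans esc s hs0 hsp
    refine ⟨[], prof, dans, esc, ?_, ?_, hs0, ?_⟩
    · simp [pvSegs, pvLast]
    · simp [PySem.List.enumerate]
    · simp [pvLast]; omega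
  | cons c rest ih =>
    intro p args cuts prof dans esc s hs0 hsp
    rw [PySem.List.enumerate_cons]
    simp only [List.foldl_cons, pvStepA, pvStepB]
    have hdrop : (p ++ [c]).drop s.toNat = p.drop s.toNat ++ [c] :=
      List.drop_append_of_le_length (l₁ := p) (l₂ := [c]) (by omega)
    have hcat : (p ++ [c]) ++ rest = p ++ c :: rest := by simp
    have hlen : (((p ++ [c]).length : Int)) = (p.length : Int) + 1 := by simp
    split_ifs with h1 h2 h3 h4 h5 h6 h7
    case _ =>
      obtain ⟨nc, prof', dans', esc', hA, hB, hb1, hb2⟩ :=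
        ih (p ++ [c]) args cuts _ _ _ s hs0 (by simp; omega)
      rw [hcat] at hA hb2
      rw [hdrop] at hA
      rw [hlen] at hB
      exact ⟨nc, prof', dans', esc', hA, hB, hb1, hb2⟩
    case _ =>
      obtain ⟨nc, prof', dans', esc', hA, hB, hb1, hb2⟩ :=
        ih (p ++ [c]) args cuts _ _ _ s hs0 (by simp; omega)
      rw [hcat] at hA hb2
      rw [hdrop] at hA
      rw [hlen] at hB
      exact ⟨nc, prof', dans', esc', hA, hB, hb1, hb2⟩
    case _ =>
      obtain ⟨nc, prof', dans', esc', hA, hB, hb1, hb2⟩ :=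
        ih (p ++ [c]) args cuts _ _ _ s hs0 (by simp; omega)
      rw [hcat] at hA hb2
      rw [hdrop] at hA
      rw [hlen] at hB
      exact ⟨nc, prof', dans', esc', hA, hB, hb1, hb2⟩
    case _ =>
      obtain ⟨nc, prof', dans', esc', hA, hB, hb1, hb2⟩ :=
        ih (p ++ [c]) args cuts _ _ _ s hs0 (by simp; omega)
      rw [hcat] at hA hb2
      rw [hdrop] at hA
      rw [hlen] at hB
      exact ⟨nc, prof', dans', esc', hA, hB, hb1, hb2⟩
    case _ =>
      obtain ⟨nc, prof', dans', esc', hA, hB, hb1, hb2⟩ :=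
        ih (p ++ [c]) args cuts _ _ _ s hs0 (by simp; omega)
      rw [hcat] at hA hb2
      rw [hdrop] at hA
      rw [hlen] at hB
      exact ⟨nc, prof', dans', esc', hA, hB, hb1, hb2⟩
    case _ =>
      obtain ⟨nc, prof', dans', esc', hA, hB, hb1, hb2⟩ :=
        ih (p ++ [c]) args cuts _ _ _ s hs0 (by simp; omega)
      rw [hcat] at hA hb2
      rw [hdrop] at hA
      rw [hlen] at hB
      exact ⟨nc, prof', dans', esc', hA, hB, hb1, hb2⟩
    case _ =>
      obtain ⟨nc, prof', dans', esc', hA, hB, hb1, hb2⟩ :=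
        ih (p ++ [c]) (args ++ [PySem.Chars.strip (List.drop s.toNat p)]) (cuts ++ [(p.length : Int)])
          prof dans esc ((p.length : Int) + 1) (by positivity) (by simp)
      rw [hcat] at hA hb2
      rw [hlen] at hB
      have hnil : (p ++ [c]).drop (((p.length : Int)) + 1).toNat = ([] : List Char) := by
        apply List.drop_eq_nil_of_le; simp
      rw [hnil] at hA
      refine ⟨(p.length : Int) :: nc, prof', dans', esc', ?_, ?_, hb1, hb2⟩
      · rw [show pvSegs (p ++ c :: rest) s ((p.length : Int) :: nc)
              = PySem.Chars.strip (List.drop s.toNat p) :: pvSegs (p ++ c :: rest) ((p.length : Int) + 1) nc from by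
            rw [pvSegs, pvSlice_prefix p (c :: rest) s hs0 hsp]]
        simpa [pvLast] using hA
      · simpa using hB
    case _ =>
      obtain ⟨nc, prof', dans', esc', hA, hB, hb1, hb2⟩ :=
        ih (p ++ [c]) args cuts _ _ _ s hs0 (by simp; omega)
      rw [hcat] at hA hb2
      rw [hdrop] at hA
      rw [hlen] at hB
      exact ⟨nc, prof', dans', esc', hA, hB, hb1, hb2⟩


lemma pvZip : ∀ (cuts : List Int) (s e : Int) (cs : List Char),
    ((s :: (cuts.map (· + 1) ++ [e])).zip (cuts.map (· + 1) ++ [e])).map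
        (fun ab => PySem.Chars.strip (PySem.List.slice cs (some ab.1) (some (ab.2 - 1))))
      = pvSegs cs s cuts ++ [PySem.Chars.strip (PySem.List.slice cs (some (pvLast s cuts)) (some (e - 1)))] := by
  intro cuts
  induction cuts with
  | nil => intro s e cs; simp [pvSegs, pvLast]
  | cons c rest ih =>
    intro s e cs
    simp only [List.map_cons, List.cons_append, List.zip_cons_cons, pvSegs, pvLast]
    rw [ih (c + 1) e cs]
    simp

-- ===== VERDICT (by name: the statement is the Claim_ definition above) =====
theorem extraire_arguments_py_spec : Claim_equal_extraire_arguments_py := by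
  intro str _
  unfold Spec_extraire_arguments_py extraire_arguments_py extraire_arguments_py_alt
  obtain ⟨nc, prof', dans', esc', hA, hB, hb1, hb2⟩ :=
    pvLoop str.toList [] [] [] 0 false false 0 le_rfl (by simp)
  simp only [List.nil_append, List.length_nil, Nat.cast_zero, List.drop_nil, Int.toNat_zero] at hA hB hb1 hb2
  have hslice : PySem.List.slice str.toList (some (pvLast 0 nc)) (some ((str.toList.length : Int)))
      = str.toList.drop (pvLast 0 nc).toNat := by
    have h := pvSlice_prefix str.toList [] (pvLast 0 nc) hb1 hb2
    simpa using h
  rw [hA]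
  simp only [hB, PySem.List.len_eq, List.tail_cons]
  rw [pvZip nc 0 ((str.toList.length : Int) + 1) str.toList]
  rw [show ((str.toList.length : Int)) + 1 - 1 = ((str.toList.length : Int)) from by ring]
  rw [hslice]
  by_cases hr : PySem.Chars.strip (str.toList.drop (pvLast 0 nc).toNat) = []
  · simp [hr, PySem.List.pyGetD_neg_one_append_singleton]
  · simp [hr, PySem.List.pyGetD_neg_one_append_singleton]
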